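-- pv_equiv track=rewrite | github.com/zakhar-e-to-1000/AlgoLabs_2 | main.py | solve
-- ===== SOURCE A (Python) =====
-- def solve(beers: list[int], workers_num):
--     start = 0
--     target = (1 << workers_num) - 1
--     visited = {0}
--     que = [(0, 0)]
--     while len(que) != 0:
--         node, dist = que.pop()
--         if node == target:
--             return dist
--         for beer in beers:
--             new_node = node | beer
--             if new_node not in visited:
--                 visited.add(new_node)
--                 que.insert(0, (new_node, dist+1))
--     return -1
-- ===== SOURCE B (Python) =====
-- def solve(beers: list[int], workers_num):
--     target = (1 << workers_num) - 1
--     # knapsack-style DP over the beers themselves: best[mask] = fewest beers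
--     # (each used at most once) whose bitwise OR equals mask
--     best = {0: 0}
--     for beer in beers:
--         for m, c in list(best.items()):
--             nm = m | beer
--             if nm not in best or c + 1 < best[nm]:
--                 best[nm] = c + 1
--     return best.get(target, -1)
-- ===== Notes on version B (the rewrite author's own statement) =====
-- stated objective: alternative
-- what changed: Replaces A's graph BFS (queue of (node,dist) pairs, visited set, O(n) insert(0)) by a knapsack-style dynamic program over the beer list itself: one pass over beers maintaining a dict mask->fewest beers whose OR equals mask, each beer relaxed once against a snapshot of the dict; the answer is dict.get(target,-1), correct because the BFS distance equals the minimum size of a sub-collection of beers whose OR is target.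
import Mathlib
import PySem

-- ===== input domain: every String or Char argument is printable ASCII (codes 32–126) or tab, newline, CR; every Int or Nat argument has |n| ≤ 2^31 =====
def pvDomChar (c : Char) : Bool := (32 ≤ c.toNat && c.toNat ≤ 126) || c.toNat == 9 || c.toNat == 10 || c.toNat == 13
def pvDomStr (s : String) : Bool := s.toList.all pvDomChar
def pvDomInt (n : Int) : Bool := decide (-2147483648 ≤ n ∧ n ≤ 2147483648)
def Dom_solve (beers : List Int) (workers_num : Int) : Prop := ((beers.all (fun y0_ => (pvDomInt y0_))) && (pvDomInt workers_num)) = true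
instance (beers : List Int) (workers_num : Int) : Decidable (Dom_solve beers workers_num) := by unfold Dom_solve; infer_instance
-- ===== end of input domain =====

-- B replaces A's queue BFS over OR-masks by a knapsack-style dynamic program over the beer
-- list itself (dict mask -> fewest beers ORing to mask, one relaxation pass per beer);
-- objective: alternative algorithm, same results.

-- ===== PORT A =====
-- Port of A's while-loop; fuel only makes the recursion total (2^len(beers)+2 provably suffices:
-- every queue insertion adds a fresh element of the finite OR-closure to visited).
def solveLoopA (beers : List Int) (target : Int) : Nat → PySem.Set Int → List (Int × Int) → Int
  | 0, _, _ => -1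
  | fuel+1, visited, que =>
    match que.getLast? with                      -- 'while len(que) != 0: node, dist = que.pop()'
    | none => -1
    | some (node, dist) =>
      if node = target then dist
      else
        let s := beers.foldl (fun (s : PySem.Set Int × List (Int × Int)) beer =>
          let nm := PySem.Int.bor node beer
          if PySem.Set.contains s.1 nm then s
          else (PySem.Set.add s.1 nm, (nm, dist+1) :: s.2)) (visited, que.dropLast)
        solveLoopA beers target fuel s.1 s.2

def solve (beers : List Int) (workers_num : Int) : Int :=
  let target : Int := (1 <<< workers_num.toNat) - 1
  solveLoopA beers target (2 ^ beers.length + 2) (PySem.Set.ofList [0]) [(0, 0)]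

-- ===== PORT B =====
-- Port of Source B: 'for m, c in list(best.items()): nm = m | beer;
--                if nm not in best or c + 1 < best[nm]: best[nm] = c + 1'
-- (the snapshot list(best.items()) is the fold's list; the live dict is the accumulator)
def dpUpd (beer : Int) (acc : PySem.Dict Int Int) (mc : Int × Int) : PySem.Dict Int Int :=
  -- nm = mc.1 | beer, inlined
  match PySem.Dict.get? acc (PySem.Int.bor mc.1 beer) with
  | none => PySem.Dict.insert acc (PySem.Int.bor mc.1 beer) (mc.2 + 1)
  | some cur =>
    if mc.2 + 1 < cur then PySem.Dict.insert acc (PySem.Int.bor mc.1 beer) (mc.2 + 1) else acc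

def dpStep (best : PySem.Dict Int Int) (beer : Int) : PySem.Dict Int Int :=
  (PySem.Dict.items best).foldl (dpUpd beer) best

def solve_alt (beers : List Int) (workers_num : Int) : Int :=
  let target : Int := (1 <<< workers_num.toNat) - 1
  let best := beers.foldl dpStep (PySem.Dict.insert PySem.Dict.empty 0 0)   -- best = {0: 0}
  PySem.Dict.getD best target (-1)                                           -- best.get(target, -1)

-- ===== PRECONDITION & SPEC =====
-- Python's '1 << workers_num' raises ValueError for negative workers_num; exactly that is excluded.
def Pre_solve (beers : List Int) (workers_num : Int) : Prop := 0 ≤ workers_num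
instance (beers : List Int) (workers_num : Int) : Decidable (Pre_solve beers workers_num) := by unfold Pre_solve; infer_instance
def pvWitness_solve : List Int × Int := ([1, 2, 3], 2)

def Spec_solve (beers : List Int) (workers_num : Int) (out : Int) : Prop := out = solve_alt beers workers_num
instance (beers : List Int) (workers_num : Int) (out : Int) : Decidable (Spec_solve beers workers_num out) := by unfold Spec_solve; infer_instance

-- ===== CLAIM (what is proved, stated in full; the proofs are below) =====
def Claim_equal_solve : Prop := ∀ (beers : List Int) (workers_num : Int), Dom_solve beers workers_num → Pre_solve beers workers_num → Spec_solve beers workers_num (solve beers workers_num)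

-- ===== LEMMAS AND PROOFS =====

-- ---- bitwise algebra for PySem.Int.bor -------------------------------------------------

theorem pv_ldiff_add_land (n : Nat) : ∀ m : Nat, Nat.ldiff n m + (n &&& m) = n := by
  induction n using Nat.binaryRec with
  | zero =>
    intro m
    have h : Nat.ldiff 0 m = 0 :=
      Nat.zero_of_testBit_eq_false (fun i => by simp [Nat.testBit_ldiff])
    simp [h]
  | bit b n ih =>
    intro m
    rw [← Nat.bit_testBit_zero_shiftRight_one m, Nat.ldiff_bit, Nat.land_bit]
    simp only [Nat.bit_val]
    have := ih (m >>> 1)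
    cases b <;> cases m.testBit 0 <;> simp <;> omega

theorem pv_sub_land (n m : Nat) : n - (n &&& m) = Nat.ldiff n m := by
  have := pv_ldiff_add_land n m; omega

theorem pv_bor_eq_lor (a b : Int) : PySem.Int.bor a b = Int.lor a b := by
  have hns : ∀ k : Nat, ¬ (0 : Int) ≤ Int.negSucc k := by
    intro k; rw [Int.negSucc_eq]; omega
  have htn : ∀ k : Nat, (-(Int.negSucc k) - 1).toNat = k := by
    intro k; rw [Int.negSucc_eq]; omega
  have hofn : ∀ k : Nat, (0:Int) ≤ Int.ofNat k := fun k => Int.natCast_nonneg k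
  have hto : ∀ k : Nat, (Int.ofNat k).toNat = k := fun k => rfl
  cases a with
  | ofNat m =>
    cases b with
    | ofNat n => simp [PySem.Int.bor, Int.lor]
    | negSucc n =>
      rw [PySem.Int.bor, if_pos (hofn m), if_neg (hns n), htn, hto]
      show _ = Int.negSucc (Nat.ldiff n m)
      rw [pv_sub_land, Int.negSucc_eq]
      omega
  | negSucc m =>
    cases b with
    | ofNat n =>
      rw [PySem.Int.bor, if_neg (hns m), if_pos (hofn n), htn, hto]
      show _ = Int.negSucc (Nat.ldiff m n)
      rw [pv_sub_land, Int.negSucc_eq]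
      omega
    | negSucc n =>
      rw [PySem.Int.bor, if_neg (hns m), if_neg (hns n), htn, htn]
      show _ = Int.negSucc (m &&& n)
      rw [Int.negSucc_eq]
      omega

theorem pv_int_ext {a b : Int} (h : ∀ k, Int.testBit a k = Int.testBit b k) : a = b := by
  cases a with
  | ofNat m =>
    cases b with
    | ofNat n =>
      have : m = n := Nat.eq_of_testBit_eq (fun i => h i)
      simp [this]
    | negSucc n =>
      exfalso
      have hk := h (m + n)
      have hm : m.testBit (m + n) = false :=
        Nat.testBit_eq_false_of_lt (lt_of_lt_of_le Nat.lt_two_pow_self (Nat.pow_le_pow_right (by omega) (by omega)))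
      have hn : n.testBit (m + n) = false :=
        Nat.testBit_eq_false_of_lt (lt_of_lt_of_le Nat.lt_two_pow_self (Nat.pow_le_pow_right (by omega) (by omega)))
      simp [Int.testBit, hm, hn] at hk
  | negSucc m =>
    cases b with
    | ofNat n =>
      exfalso
      have hk := h (m + n)
      have hm : m.testBit (m + n) = false :=
        Nat.testBit_eq_false_of_lt (lt_of_lt_of_le Nat.lt_two_pow_self (Nat.pow_le_pow_right (by omega) (by omega)))
      have hn : n.testBit (m + n) = false :=
        Nat.testBit_eq_false_of_lt (lt_of_lt_of_le Nat.lt_two_pow_self (Nat.pow_le_pow_right (by omega) (by omega)))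
      simp [Int.testBit, hm, hn] at hk
    | negSucc n =>
      have : m = n := Nat.eq_of_testBit_eq (fun i => by
        have := h i; simp [Int.testBit] at this; exact this)
      simp [this]

theorem pv_testBit_bor (a b : Int) (k : Nat) :
    Int.testBit (PySem.Int.bor a b) k = (Int.testBit a k || Int.testBit b k) := by
  rw [pv_bor_eq_lor]; exact Int.testBit_lor a b k

theorem pv_bor_self_right (x b : Int) : PySem.Int.bor (PySem.Int.bor x b) b = PySem.Int.bor x b :=
  pv_int_ext (fun k => by simp [pv_testBit_bor])

theorem pv_bor_right_comm (x b c : Int) :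
    PySem.Int.bor (PySem.Int.bor x b) c = PySem.Int.bor (PySem.Int.bor x c) b :=
  pv_int_ext (fun k => by
    simp [pv_testBit_bor, Bool.or_assoc, Bool.or_comm (Int.testBit b k)])

-- ---- the finite OR-closure and its cardinality ------------------------------------------

def orClosure (bs : List Int) : List Int :=
  bs.foldr (fun b acc => acc ++ acc.map (fun x => PySem.Int.bor x b)) [0]

theorem zero_mem_orClosure (bs : List Int) : (0 : Int) ∈ orClosure bs := by
  induction bs with
  | nil => simp [orClosure]
  | cons b bs ih => simp [orClosure] at ih ⊢; exact Or.inl ih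

theorem orClosure_closed {bs : List Int} {x b : Int}
    (hx : x ∈ orClosure bs) (hb : b ∈ bs) : PySem.Int.bor x b ∈ orClosure bs := by
  induction bs generalizing x with
  | nil => simp at hb
  | cons c cs ih =>
    simp only [orClosure, List.foldr] at hx ⊢
    rcases List.mem_append.1 hx with hA | hA
    · rcases List.mem_cons.1 hb with rfl | hb'
      · exact List.mem_append.2 (Or.inr (List.mem_map.2 ⟨x, hA, rfl⟩))
      · exact List.mem_append.2 (Or.inl (ih hA hb'))
    · rcases List.mem_map.1 hA with ⟨y, hy, rfl⟩
      rcases List.mem_cons.1 hb with rfl | hb'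
      · rw [pv_bor_self_right]
        exact List.mem_append.2 (Or.inr (List.mem_map.2 ⟨y, hy, rfl⟩))
      · rw [pv_bor_right_comm]
        exact List.mem_append.2 (Or.inr (List.mem_map.2 ⟨PySem.Int.bor y b, ih hy hb', rfl⟩))

theorem orClosure_length (bs : List Int) : (orClosure bs).length = 2 ^ bs.length := by
  induction bs with
  | nil => simp [orClosure]
  | cons b bs ih => simp [orClosure] at ih ⊢; rw [ih]; ring

theorem pv_card_le {v w : List Int} (hnd : v.Nodup) (hsub : ∀ x ∈ v, x ∈ w) :
    v.length ≤ w.dedup.length := by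
  classical
  have h1 : v.toFinset.card = v.length := List.toFinset_card_of_nodup hnd
  have h2 : v.toFinset ⊆ w.toFinset := by
    intro x hx; simp only [List.mem_toFinset] at hx ⊢; exact hsub x hx
  have := Finset.card_le_card h2
  rw [h1, List.card_toFinset] at this
  exact this

-- ---- per-node and per-level processing for the BFS simulation ---------------------------

def procNode (node : Int) : List Int → PySem.Set Int → PySem.Set Int × List Int
  | [], v => (v, [])
  | b :: rest, v =>
    let nm := PySem.Int.bor node b
    if PySem.Set.contains v nm then procNode node rest v
    else
      let p := procNode node rest (PySem.Set.add v nm)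
      (p.1, nm :: p.2)

def procLevel (beers : List Int) : List Int → PySem.Set Int → PySem.Set Int × List Int
  | [], v => (v, [])
  | c :: cs, v =>
    let p := procNode c beers v
    let q := procLevel beers cs p.1
    (q.1, p.2 ++ q.2)

theorem procNode_visited (node : Int) (bs : List Int) (v : PySem.Set Int) :
    (procNode node bs v).1 = v ++ (procNode node bs v).2 := by
  induction bs generalizing v with
  | nil => simp [procNode]
  | cons b rest ih =>
    simp only [procNode]
    cases h : PySem.Set.contains v (PySem.Int.bor node b) with
    | true => simpa using ih v
    | false =>
      have hmem : PySem.Int.bor node b ∉ (v : List Int) := by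
        intro hm
        have hct : PySem.Set.contains v (PySem.Int.bor node b) = true := by
          rw [PySem.Set.contains_eq_listContains, List.contains_eq_mem]; simpa using hm
        rw [h] at hct; cases hct
      have hadd : PySem.Set.add v (PySem.Int.bor node b) = v ++ [PySem.Int.bor node b] := by
        simp [PySem.Set.add, hmem]
      simp only [Bool.false_eq_true, if_false]
      rw [ih (PySem.Set.add v (PySem.Int.bor node b)), hadd]
      simp

theorem procLevel_visited (beers cur : List Int) (v : PySem.Set Int) :
    (procLevel beers cur v).1 = v ++ (procLevel beers cur v).2 := by
  induction cur generalizing v with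
  | nil => simp [procLevel]
  | cons c cs ih =>
    simp only [procLevel]
    rw [ih (procNode c beers v).1, procNode_visited]
    simp

theorem procNode_nodup (node : Int) (bs : List Int) (v : PySem.Set Int) (h : (v : List Int).Nodup) :
    ((procNode node bs v).1 : List Int).Nodup := by
  induction bs generalizing v with
  | nil => simpa [procNode] using h
  | cons b rest ih =>
    simp only [procNode]
    cases hc : PySem.Set.contains v (PySem.Int.bor node b) with
    | true => simpa using ih v h
    | false =>
      simp only [Bool.false_eq_true, if_false]
      apply ih
      have hmem : PySem.Int.bor node b ∉ (v : List Int) := by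
        intro hm
        have hct : PySem.Set.contains v (PySem.Int.bor node b) = true := by
          rw [PySem.Set.contains_eq_listContains, List.contains_eq_mem]; simpa using hm
        rw [hc] at hct; cases hct
      have hadd : PySem.Set.add v (PySem.Int.bor node b) = v ++ [PySem.Int.bor node b] := by
        simp [PySem.Set.add, hmem]
      rw [hadd]
      exact h.append (List.nodup_singleton _) (by simpa [List.disjoint_singleton] using hmem)

theorem procLevel_nodup (beers cur : List Int) (v : PySem.Set Int) (h : (v : List Int).Nodup) :
    ((procLevel beers cur v).1 : List Int).Nodup := by
  induction cur generalizing v with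
  | nil => simpa [procLevel] using h
  | cons c cs ih =>
    simp only [procLevel]
    exact ih _ (procNode_nodup c beers v h)

theorem procNode_image (node : Int) (bs : List Int) (v : PySem.Set Int) :
    ∀ x ∈ (procNode node bs v).2, ∃ b ∈ bs, x = PySem.Int.bor node b := by
  induction bs generalizing v with
  | nil => simp [procNode]
  | cons b rest ih =>
    simp only [procNode]
    cases h : PySem.Set.contains v (PySem.Int.bor node b) with
    | true =>
      simp only [if_true]
      intro x hx
      rcases ih v x hx with ⟨b', hb', rfl⟩
      exact ⟨b', List.mem_cons_of_mem _ hb', rfl⟩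
    | false =>
      simp only [Bool.false_eq_true, if_false]
      intro x hx
      rcases List.mem_cons.1 hx with rfl | hx'
      · exact ⟨b, List.mem_cons_self .., rfl⟩
      · rcases ih _ x hx' with ⟨b', hb', rfl⟩
        exact ⟨b', List.mem_cons_of_mem _ hb', rfl⟩

theorem procLevel_image (beers cur : List Int) (v : PySem.Set Int) :
    ∀ x ∈ (procLevel beers cur v).2, ∃ c ∈ cur, ∃ b ∈ beers, x = PySem.Int.bor c b := by
  induction cur generalizing v with
  | nil => simp [procLevel]
  | cons c cs ih =>
    simp only [procLevel]
    intro x hx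
    rcases List.mem_append.1 hx with hx' | hx'
    · rcases procNode_image c beers v x hx' with ⟨b, hb, rfl⟩
      exact ⟨c, List.mem_cons_self .., b, hb, rfl⟩
    · rcases ih _ x hx' with ⟨c', hc', b, hb, rfl⟩
      exact ⟨c', List.mem_cons_of_mem _ hc', b, hb, rfl⟩

theorem set_contains_iff (s : PySem.Set Int) (y : Int) :
    PySem.Set.contains s y = true ↔ y ∈ (s : List Int) := by
  rw [PySem.Set.contains_eq_listContains, List.contains_eq_mem]; simp

theorem mem_procNode_snd_of (node : Int) : ∀ (bs : List Int) (v : PySem.Set Int) (x : Int),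
    x ∉ (v : List Int) → (∃ b ∈ bs, x = PySem.Int.bor node b) → x ∈ (procNode node bs v).2 := by
  intro bs
  induction bs with
  | nil => intro v x _ hex; simp at hex
  | cons b rest ih =>
    intro v x hxv hex
    simp only [procNode]
    cases hc : PySem.Set.contains v (PySem.Int.bor node b) with
    | true =>
      simp only [if_true]
      rcases hex with ⟨b0, hb0, rfl⟩
      rcases List.mem_cons.1 hb0 with rfl | hb0'
      · exact absurd ((set_contains_iff v _).1 hc) hxv
      · exact ih v _ hxv ⟨b0, hb0', rfl⟩
    | false =>
      simp only [Bool.false_eq_true, if_false]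
      by_cases hxnm : x = PySem.Int.bor node b
      · exact hxnm ▸ List.mem_cons_self ..
      · rcases hex with ⟨b0, hb0, rfl⟩
        rcases List.mem_cons.1 hb0 with rfl | hb0'
        · exact absurd rfl hxnm
        · have hnmv : PySem.Int.bor node b ∉ (v : List Int) := by
            intro hm; rw [← set_contains_iff] at hm; rw [hc] at hm; cases hm
          have hadd : PySem.Set.add v (PySem.Int.bor node b) = v ++ [PySem.Int.bor node b] := by
            simp [PySem.Set.add, hnmv]
          refine List.mem_cons_of_mem _ (ih _ _ ?_ ⟨b0, hb0', rfl⟩)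
          rw [hadd]
          simp only [List.mem_append, List.mem_singleton]
          rintro (h1 | h1)
          · exact hxv h1
          · exact hxnm h1

theorem mem_procNode_snd (node : Int) (bs : List Int) (v : PySem.Set Int)
    (hnd : (v : List Int).Nodup) (x : Int) :
    x ∈ (procNode node bs v).2 ↔ (x ∉ (v : List Int) ∧ ∃ b ∈ bs, x = PySem.Int.bor node b) := by
  constructor
  · intro hx
    refine ⟨?_, procNode_image node bs v x hx⟩
    have h1 := procNode_nodup node bs v hnd
    rw [procNode_visited] at h1
    intro hv
    have hd := (List.nodup_append.1 h1).2.2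
    exact hd x hv x hx rfl
  · rintro ⟨hxv, hex⟩
    exact mem_procNode_snd_of node bs v x hxv hex

theorem mem_procLevel_snd (beers cur : List Int) (v : PySem.Set Int)
    (hnd : (v : List Int).Nodup) (x : Int) :
    x ∈ (procLevel beers cur v).2 ↔ (x ∉ (v : List Int) ∧ ∃ c ∈ cur, ∃ b ∈ beers, x = PySem.Int.bor c b) := by
  constructor
  · intro hx
    refine ⟨?_, procLevel_image beers cur v x hx⟩
    have h1 := procLevel_nodup beers cur v hnd
    rw [procLevel_visited] at h1
    intro hv
    have hd := (List.nodup_append.1 h1).2.2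
    exact hd x hv x hx rfl
  · rintro ⟨hxv, hex⟩
    induction cur generalizing v with
    | nil => rcases hex with ⟨c, hc, _⟩; simp at hc
    | cons c0 cs ih =>
      simp only [procLevel, List.mem_append]
      rcases hex with ⟨c, hc, b, hb, rfl⟩
      rcases List.mem_cons.1 hc with rfl | hc'
      · exact Or.inl ((mem_procNode_snd c beers v hnd _).2 ⟨hxv, b, hb, rfl⟩)
      · by_cases hfirst : PySem.Int.bor c b ∈ (procNode c0 beers v).2
        · exact Or.inl hfirst
        · refine Or.inr (ih (procNode c0 beers v).1 (procNode_nodup c0 beers v hnd) ?_ ⟨c, hc', b, hb, rfl⟩)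
          rw [procNode_visited, List.mem_append]
          rintro (h1 | h1)
          · exact hxv h1
          · exact hfirst h1

-- A's inner for-loop over beers computes procNode, prepending the new pairs.
theorem foldA_eq_procNode (node dist : Int) (bs : List Int) (v : PySem.Set Int) (q : List (Int × Int)) :
    bs.foldl (fun (s : PySem.Set Int × List (Int × Int)) beer =>
      let nm := PySem.Int.bor node beer
      if PySem.Set.contains s.1 nm then s
      else (PySem.Set.add s.1 nm, (nm, dist+1) :: s.2)) (v, q)
    = ((procNode node bs v).1,
       (((procNode node bs v).2).map (fun x => (x, dist+1))).reverse ++ q) := by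
  induction bs generalizing v q with
  | nil => simp [procNode]
  | cons b rest ih =>
    simp only [List.foldl_cons, procNode]
    cases h : PySem.Set.contains v (PySem.Int.bor node b) with
    | true => simp only [if_true]; exact ih v q
    | false =>
      simp only [Bool.false_eq_true, if_false]
      rw [ih (PySem.Set.add v (PySem.Int.bor node b)) ((PySem.Int.bor node b, dist+1) :: q)]
      simp

-- level-synchronous BFS: proof-only reference machine between A's queue BFS and B's DP
def levelBFS (beers : List Int) (target : Int) : Nat → PySem.Set Int → PySem.Set Int → Int → Int
  | 0, _, _, _ => -1
  | fuel+1, visited, frontier, dist =>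
    if frontier = [] then -1
    else if PySem.Set.contains frontier target then dist
    else
      let s := frontier.foldl (fun s m =>
          beers.foldl (fun (s : PySem.Set Int × PySem.Set Int) beer =>
            let nm := PySem.Int.bor m beer
            if PySem.Set.contains s.1 nm then s
            else (PySem.Set.add s.1 nm, PySem.Set.add s.2 nm)) s)
        (visited, PySem.Set.empty)
      levelBFS beers target fuel s.1 s.2 (dist + 1)

theorem foldB_eq_procNode (m : Int) (bs : List Int) (v t : PySem.Set Int) (ht : ∀ x ∈ (t : List Int), x ∈ (v : List Int)) :
    bs.foldl (fun (s : PySem.Set Int × PySem.Set Int) beer =>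
      let nm := PySem.Int.bor m beer
      if PySem.Set.contains s.1 nm then s
      else (PySem.Set.add s.1 nm, PySem.Set.add s.2 nm)) (v, t)
    = ((procNode m bs v).1, t ++ (procNode m bs v).2) := by
  induction bs generalizing v t with
  | nil => simp [procNode]
  | cons b rest ih =>
    simp only [List.foldl_cons, procNode]
    cases h : PySem.Set.contains v (PySem.Int.bor m b) with
    | true => simp only [if_true]; exact ih v t ht
    | false =>
      simp only [Bool.false_eq_true, if_false]
      have hmem : PySem.Int.bor m b ∉ (v : List Int) := by
        intro hm
        have hct : PySem.Set.contains v (PySem.Int.bor m b) = true := by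
          rw [PySem.Set.contains_eq_listContains, List.contains_eq_mem]; simpa using hm
        rw [h] at hct; cases hct
      have hmt : PySem.Int.bor m b ∉ (t : List Int) := fun hmm => hmem (ht _ hmm)
      have haddv : PySem.Set.add v (PySem.Int.bor m b) = v ++ [PySem.Int.bor m b] := by
        simp [PySem.Set.add, hmem]
      have haddt : PySem.Set.add t (PySem.Int.bor m b) = t ++ [PySem.Int.bor m b] := by
        simp [PySem.Set.add, hmt]
      rw [ih (PySem.Set.add v (PySem.Int.bor m b)) (PySem.Set.add t (PySem.Int.bor m b))
          (by rw [haddv, haddt]; intro x hx; rcases List.mem_append.1 hx with h1 | h1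
              · exact List.mem_append.2 (Or.inl (ht _ h1))
              · exact List.mem_append.2 (Or.inr h1))]
      rw [haddt]
      simp

theorem foldB_eq_procLevel (beers cur : List Int) (v t : PySem.Set Int) (ht : ∀ x ∈ (t : List Int), x ∈ (v : List Int)) :
    cur.foldl (fun s m =>
      beers.foldl (fun (s : PySem.Set Int × PySem.Set Int) beer =>
        let nm := PySem.Int.bor m beer
        if PySem.Set.contains s.1 nm then s
        else (PySem.Set.add s.1 nm, PySem.Set.add s.2 nm)) s) (v, t)
    = ((procLevel beers cur v).1, t ++ (procLevel beers cur v).2) := by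
  induction cur generalizing v t with
  | nil => simp [procLevel]
  | cons c cs ih =>
    simp only [List.foldl_cons, procLevel]
    rw [foldB_eq_procNode c beers v t ht]
    rw [ih (procNode c beers v).1 (t ++ (procNode c beers v).2)
        (by intro x hx
            rw [procNode_visited]
            rcases List.mem_append.1 hx with h1 | h1
            · exact List.mem_append.2 (Or.inl (ht _ h1))
            · exact List.mem_append.2 (Or.inr h1))]
    simp

theorem loopA_concat (beers : List Int) (target : Int) (f : Nat) (v : PySem.Set Int)
    (l : List (Int × Int)) (node dist : Int) :
    solveLoopA beers target (f+1) v (l ++ [(node, dist)]) =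
    if node = target then dist
    else solveLoopA beers target f (procNode node beers v).1
      ((((procNode node beers v).2).map (fun x => (x, dist+1))).reverse ++ l) := by
  simp only [solveLoopA, List.getLast?_concat, List.dropLast_concat, foldA_eq_procNode]

theorem runLevelA_found (beers : List Int) (target : Int) (d : Int) :
    ∀ (cur : List Int) (v : PySem.Set Int) (acc : List Int) (fA : Nat), target ∈ cur →
    solveLoopA beers target (fA + cur.length) v
      ((acc.map (fun x => (x, d+1))).reverse ++ (cur.map (fun x => (x, d))).reverse) = d := by
  intro cur
  induction cur with
  | nil => intro v acc fA h; simp at h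
  | cons c cs ih =>
    intro v acc fA h
    have hq : (acc.map (fun x => (x, d+1))).reverse ++ ((c :: cs).map (fun x => (x, d))).reverse
        = ((acc.map (fun x => (x, d+1))).reverse ++ (cs.map (fun x => (x, d))).reverse) ++ [(c, d)] := by
      simp
    rw [List.length_cons, hq]
    show solveLoopA beers target ((fA + cs.length) + 1) v _ = d
    rw [loopA_concat]
    by_cases hc : c = target
    · simp [hc]
    · rw [if_neg hc]
      have hq2 : ((procNode c beers v).2.map (fun x => (x, d+1))).reverse ++
          ((acc.map (fun x => (x, d+1))).reverse ++ (cs.map (fun x => (x, d))).reverse)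
          = (((acc ++ (procNode c beers v).2).map (fun x => (x, d+1))).reverse ++ (cs.map (fun x => (x, d))).reverse) := by
        simp
      rw [hq2]
      exact ih _ _ fA (by rcases List.mem_cons.1 h with h' | h' ; exact absurd h'.symm hc; exact h')

theorem runLevelA (beers : List Int) (target : Int) (d : Int) :
    ∀ (cur : List Int) (v : PySem.Set Int) (acc : List Int) (fA : Nat), target ∉ cur →
    solveLoopA beers target (fA + cur.length) v
      ((acc.map (fun x => (x, d+1))).reverse ++ (cur.map (fun x => (x, d))).reverse)
    = solveLoopA beers target fA (procLevel beers cur v).1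
        (((acc ++ (procLevel beers cur v).2).map (fun x => (x, d+1))).reverse) := by
  intro cur
  induction cur with
  | nil => intro v acc fA _; simp [procLevel]
  | cons c cs ih =>
    intro v acc fA h
    have hc : c ≠ target := fun hc => h (hc ▸ List.mem_cons_self ..)
    have hq : (acc.map (fun x => (x, d+1))).reverse ++ ((c :: cs).map (fun x => (x, d))).reverse
        = ((acc.map (fun x => (x, d+1))).reverse ++ (cs.map (fun x => (x, d))).reverse) ++ [(c, d)] := by
      simp
    rw [List.length_cons, hq]
    show solveLoopA beers target ((fA + cs.length) + 1) v _ = _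
    rw [loopA_concat, if_neg hc]
    have hq2 : ((procNode c beers v).2.map (fun x => (x, d+1))).reverse ++
        ((acc.map (fun x => (x, d+1))).reverse ++ (cs.map (fun x => (x, d))).reverse)
        = (((acc ++ (procNode c beers v).2).map (fun x => (x, d+1))).reverse ++ (cs.map (fun x => (x, d))).reverse) := by
      simp
    rw [hq2, ih _ _ fA (fun hm => h (List.mem_cons_of_mem _ hm))]
    simp only [procLevel]
    simp [List.append_assoc]

-- the simulation: A's queue BFS = level BFS, given enough fuel on both sides
theorem simulation (beers : List Int) (target : Int) :
    ∀ (fB fA : Nat) (v f : PySem.Set Int) (d : Int),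
    (v : List Int).Nodup →
    (∀ x ∈ (v : List Int), x ∈ orClosure beers) →
    (∀ x ∈ (f : List Int), x ∈ (v : List Int)) →
    fA ≥ f.length + ((orClosure beers).dedup.length - v.length) + 1 →
    fB ≥ ((orClosure beers).dedup.length - v.length) + 2 →
    solveLoopA beers target fA v ((f.map (fun x => (x, d))).reverse)
      = levelBFS beers target fB v f d := by
  intro fB
  induction fB with
  | zero => intro fA v f d _ _ _ _ hfB; omega
  | succ fB' ih =>
    intro fA v f d hnd hvc hfv hfA hfB
    by_cases hfe : (f : PySem.Set Int) = []
    · subst hfe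
      obtain ⟨fA', rfl⟩ : ∃ fA', fA = fA' + 1 := ⟨fA - 1, by omega⟩
      simp [solveLoopA, levelBFS]
    · by_cases htf : target ∈ (f : List Int)
      · have hcont : PySem.Set.contains f target = true := by
          rw [PySem.Set.contains_eq_listContains, List.contains_eq_mem]; simpa using htf
        have hB : levelBFS beers target (fB' + 1) v f d = d := by
          simp only [levelBFS]; rw [if_neg hfe, hcont]; simp
        rw [hB]
        have hsplit : fA = (fA - f.length) + f.length := by omega
        rw [hsplit]
        have := runLevelA_found beers target d f v [] (fA - f.length) htf
        simpa using this
      · have hcont : PySem.Set.contains f target = false := by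
          rw [PySem.Set.contains_eq_listContains, List.contains_eq_mem]; simpa using htf
        set L := procLevel beers f v with hL
        have hLvis : (L.1 : List Int) = v ++ L.2 := procLevel_visited beers f v
        have hnd' : (L.1 : List Int).Nodup := procLevel_nodup beers f v hnd
        have hlen : (L.1 : List Int).length = v.length + L.2.length := by
          rw [hLvis, List.length_append]
        have hsub' : ∀ x ∈ (L.1 : List Int), x ∈ orClosure beers := by
          intro x hx
          rw [hLvis] at hx
          rcases List.mem_append.1 hx with h1 | h1
          · exact hvc x h1
          · rcases procLevel_image beers f v x h1 with ⟨c, hc, bb, hbb, rfl⟩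
            exact orClosure_closed (hvc c (hfv c hc)) hbb
        have hC : (L.1 : List Int).length ≤ (orClosure beers).dedup.length :=
          pv_card_le hnd' hsub'
        have hB : levelBFS beers target (fB' + 1) v f d
            = levelBFS beers target fB' L.1 L.2 (d + 1) := by
          simp only [levelBFS]
          rw [if_neg hfe, hcont]
          rw [foldB_eq_procLevel beers f v PySem.Set.empty
              (by intro x hx; simp [PySem.Set.empty] at hx)]
          simp only [PySem.Set.empty, List.nil_append, Bool.false_eq_true, if_false]
          rw [hL]
        rw [hB]
        have hsplit : fA = (fA - f.length) + f.length := by omega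
        rw [hsplit]
        have hA := runLevelA beers target d f v [] (fA - f.length) htf
        simp only [List.map_nil, List.reverse_nil, List.nil_append] at hA
        rw [hA]
        by_cases hδ : (L.2 : List Int) = []
        · have hv : L.1 = v := by rw [hLvis, hδ, List.append_nil]
          rw [hδ, hv]
          obtain ⟨g, hg⟩ : ∃ g, fA - f.length = g + 1 := ⟨fA - f.length - 1, by omega⟩
          obtain ⟨g', hg'⟩ : ∃ g', fB' = g' + 1 := ⟨fB' - 1, by omega⟩
          rw [hg, hg']
          simp [solveLoopA, levelBFS]
        · have hδlen : 1 ≤ (L.2 : List Int).length := by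
            cases hh : (L.2 : List Int) with
            | nil => exact absurd hh hδ
            | cons x xs => simp
          exact ih (fA - f.length) L.1 L.2 (d + 1) hnd' hsub'
            (by intro x hx; rw [hLvis]; exact List.mem_append.2 (Or.inr hx))
            (by omega) (by omega)

-- ---- ORs of sub-collections of beers ----------------------------------------------------

def orF (s : List Int) : Int := s.foldl PySem.Int.bor 0

-- Good beers d x: x is the OR of some ≤ d of the beers
def Good (beers : List Int) (d : Nat) (x : Int) : Prop :=
  ∃ s, s.Sublist beers ∧ s.length ≤ d ∧ orF s = x

def AnswerSpec (beers : List Int) (target r : Int) : Prop :=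
  (r = -1 ∧ ∀ k : Nat, ¬ Good beers k target) ∨
  (∃ n : Nat, r = (n : Int) ∧ Good beers n target ∧ ∀ k < n, ¬ Good beers k target)

theorem answerSpec_unique {beers : List Int} {t r r' : Int}
    (h : AnswerSpec beers t r) (h' : AnswerSpec beers t r') : r = r' := by
  rcases h with ⟨rfl, hnone⟩ | ⟨n, rfl, hg, hmin⟩
  · rcases h' with ⟨rfl, _⟩ | ⟨n', rfl, hg', _⟩
    · rfl
    · exact absurd hg' (hnone n')
  · rcases h' with ⟨rfl, hnone'⟩ | ⟨n', rfl, hg', hmin'⟩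
    · exact absurd hg (hnone' n)
    · have h1 : ¬ n < n' := fun hlt => hmin' n hlt hg
      have h2 : ¬ n' < n := fun hlt => hmin n' hlt hg'
      have : n = n' := by omega
      rw [this]

theorem pv_testBit_foldl_bor (l : List Int) : ∀ (a : Int) (k : Nat),
    Int.testBit (l.foldl PySem.Int.bor a) k = (Int.testBit a k || l.any (fun y => Int.testBit y k)) := by
  induction l with
  | nil => intro a k; simp
  | cons y l ih =>
    intro a k
    simp [List.foldl_cons, ih, pv_testBit_bor, Bool.or_assoc]

theorem orF_eq_of_mem_iff {s t : List Int} (h : ∀ y, y ∈ s ↔ y ∈ t) : orF s = orF t := by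
  apply pv_int_ext
  intro k
  simp only [orF, pv_testBit_foldl_bor]
  congr 1
  rw [Bool.eq_iff_iff]
  simp only [List.any_eq_true]
  constructor
  · rintro ⟨y, hy, hp⟩; exact ⟨y, (h y).1 hy, hp⟩
  · rintro ⟨y, hy, hp⟩; exact ⟨y, (h y).2 hy, hp⟩

theorem orF_concat (s : List Int) (b : Int) : orF (s ++ [b]) = PySem.Int.bor (orF s) b := by
  simp [orF, List.foldl_append]

theorem good_zero_iff (beers : List Int) (x : Int) : Good beers 0 x ↔ x = 0 := by
  constructor
  · rintro ⟨s, _, hlen, rfl⟩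
    have : s = [] := List.length_eq_zero_iff.1 (Nat.le_zero.1 hlen)
    rw [this]; rfl
  · rintro rfl
    exact ⟨[], List.nil_sublist _, Nat.zero_le _, rfl⟩

theorem good_mono {beers : List Int} {d d' : Nat} (h : d ≤ d') {x : Int} :
    Good beers d x → Good beers d' x := by
  rintro ⟨s, hsub, hlen, rfl⟩
  exact ⟨s, hsub, le_trans hlen h, rfl⟩

theorem good_step {beers : List Int} {d : Nat} {y b : Int}
    (hy : Good beers d y) (hb : b ∈ beers) : Good beers (d+1) (PySem.Int.bor y b) := by
  obtain ⟨s, hsub, hlen, rfl⟩ := hy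
  have htmem : ∀ y ∈ s ++ [b], y ∈ beers := by
    intro y hy
    rcases List.mem_append.1 hy with h1 | h1
    · exact hsub.subset h1
    · rw [List.mem_singleton.1 h1]; exact hb
  have hnd : (s ++ [b]).dedup.Nodup := List.nodup_dedup _
  have hss : (s ++ [b]).dedup ⊆ beers := fun y hy => htmem y (List.mem_dedup.1 hy)
  obtain ⟨u, hperm, husub⟩ := hnd.subperm hss
  refine ⟨u, husub, ?_, ?_⟩
  · have h1 := hperm.length_eq
    have h2 : (s ++ [b]).dedup.length ≤ (s ++ [b]).length := (List.dedup_sublist _).length_le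
    simp only [List.length_append, List.length_singleton] at h2
    omega
  · have h1 : orF u = orF (s ++ [b]).dedup := orF_eq_of_mem_iff (fun y => hperm.mem_iff)
    have h2 : orF (s ++ [b]).dedup = orF (s ++ [b]) := orF_eq_of_mem_iff (fun y => List.mem_dedup)
    rw [h1, h2, orF_concat]

theorem good_succ_decomp {beers : List Int} {n : Nat} {x : Int} (h : Good beers (n+1) x) :
    Good beers n x ∨ ∃ y b, Good beers n y ∧ b ∈ beers ∧ x = PySem.Int.bor y b := by
  obtain ⟨s, hsub, hlen, rfl⟩ := h
  by_cases hsl : s.length ≤ n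
  · exact Or.inl ⟨s, hsub, hsl, rfl⟩
  · have hne : s ≠ [] := by intro h0; subst h0; simp at hsl
    refine Or.inr ⟨orF s.dropLast, s.getLast hne,
      ⟨s.dropLast, (List.dropLast_sublist s).trans hsub, ?_, rfl⟩,
      hsub.subset (List.getLast_mem hne), ?_⟩
    · have h3 : (List.dropLast s).length = s.length - 1 := List.length_dropLast
      omega
    · rw [← orF_concat, List.dropLast_append_getLast hne]

theorem orF_mem_closure {beers : List Int} {s : List Int} (h : s.Sublist beers) :
    orF s ∈ orClosure beers := by
  have aux : ∀ (s : List Int) (a : Int), (∀ y ∈ s, y ∈ beers) → a ∈ orClosure beers →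
      s.foldl PySem.Int.bor a ∈ orClosure beers := by
    intro s
    induction s with
    | nil => intro a _ ha; simpa using ha
    | cons y l ih =>
      intro a hmem ha
      simp only [List.foldl_cons]
      exact ih _ (fun z hz => hmem z (List.mem_cons_of_mem _ hz))
        (orClosure_closed ha (hmem y (List.mem_cons_self ..)))
  exact aux s 0 (fun y hy => h.subset hy) (zero_mem_orClosure beers)

theorem good_stab {beers : List Int} {n : Nat}
    (h : ∀ x, Good beers n x → ∃ k < n, Good beers k x) :
    ∀ m x, Good beers m x → ∃ k < n, Good beers k x := by
  have hn0 : 0 < n := by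
    obtain ⟨k, hk, _⟩ := h 0 ⟨[], List.nil_sublist _, Nat.zero_le _, rfl⟩
    omega
  intro m
  induction m using Nat.strong_induction_on with
  | _ m ih =>
    intro x hx
    rcases Nat.lt_or_ge m n with hmn | hmn
    · exact ⟨m, hmn, hx⟩
    · obtain ⟨m', rfl⟩ : ∃ m', m = m' + 1 := ⟨m - 1, by omega⟩
      rcases good_succ_decomp hx with h1 | ⟨y, b, hy, hb, rfl⟩
      · exact ih m' (by omega) x h1
      · obtain ⟨k, hk, hky⟩ := ih m' (by omega) y hy
        exact h _ (good_mono (by omega) (good_step hky hb))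

theorem levelBFS_correct (beers : List Int) (target : Int) :
    ∀ (fuel : Nat) (n : Nat) (v f : PySem.Set Int),
    (v : List Int).Nodup →
    (∀ x, x ∈ (v : List Int) ↔ Good beers n x) →
    (∀ x, x ∈ (f : List Int) ↔ (Good beers n x ∧ ¬ ∃ k < n, Good beers k x)) →
    (∀ k < n, ¬ Good beers k target) →
    fuel ≥ ((orClosure beers).dedup.length - v.length) + 2 →
    AnswerSpec beers target (levelBFS beers target fuel v f (n : Int)) := by
  intro fuel
  induction fuel with
  | zero => intro n v f _ _ _ _ hfuel; omega
  | succ fuel' ih =>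
    intro n v f hnd hv hf htgt hfuel
    by_cases hfe : (f : PySem.Set Int) = []
    · subst hfe
      have hstab : ∀ x, Good beers n x → ∃ k < n, Good beers k x := by
        intro x hx
        by_contra hcon
        have hmem : x ∈ (([] : PySem.Set Int) : List Int) := (hf x).2 ⟨hx, hcon⟩
        simp at hmem
      have hval : levelBFS beers target (fuel'+1) v [] (n : Int) = -1 := by
        simp [levelBFS]
      rw [hval]
      refine Or.inl ⟨rfl, ?_⟩
      intro k hk
      obtain ⟨k', hk', hg'⟩ := good_stab hstab k target hk
      exact htgt k' hk' hg'
    · by_cases htf : target ∈ (f : List Int)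
      · have hcont : PySem.Set.contains f target = true := (set_contains_iff f target).2 htf
        have hval : levelBFS beers target (fuel'+1) v f (n : Int) = (n : Int) := by
          simp only [levelBFS]; rw [if_neg hfe, hcont]; simp
        rw [hval]
        exact Or.inr ⟨n, rfl, ((hf target).1 htf).1, htgt⟩
      · have hcont : PySem.Set.contains f target = false := by
          cases hcc : PySem.Set.contains f target
          · rfl
          · exact absurd ((set_contains_iff f target).1 hcc) htf
        set L := procLevel beers f v with hL
        have hLvis : (L.1 : List Int) = v ++ L.2 := procLevel_visited beers f v
        have hnd' : (L.1 : List Int).Nodup := procLevel_nodup beers f v hnd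
        have hv' : ∀ x, x ∈ (L.1 : List Int) ↔ Good beers (n+1) x := by
          intro x
          constructor
          · intro hx
            rw [hLvis, List.mem_append] at hx
            rcases hx with h1 | h1
            · exact good_mono (Nat.le_succ n) ((hv x).1 h1)
            · obtain ⟨-, c, hc, b, hb, rfl⟩ := (mem_procLevel_snd beers f v hnd x).1 h1
              exact good_step ((hf c).1 hc).1 hb
          · intro hx
            rcases good_succ_decomp hx with h1 | ⟨y, b, hy, hb, rfl⟩
            · rw [hLvis, List.mem_append]; exact Or.inl ((hv x).2 h1)
            · by_cases hxv : PySem.Int.bor y b ∈ (v : List Int)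
              · rw [hLvis, List.mem_append]; exact Or.inl hxv
              · by_cases hyk : ∃ k < n, Good beers k y
                · obtain ⟨k, hk, hky⟩ := hyk
                  have hgn : Good beers n (PySem.Int.bor y b) := good_mono (by omega) (good_step hky hb)
                  exact absurd ((hv _).2 hgn) hxv
                · have hyf : y ∈ (f : List Int) := (hf y).2 ⟨hy, hyk⟩
                  rw [hLvis, List.mem_append]
                  exact Or.inr ((mem_procLevel_snd beers f v hnd _).2 ⟨hxv, y, hyf, b, hb, rfl⟩)
        have hf' : ∀ x, x ∈ (L.2 : List Int) ↔ (Good beers (n+1) x ∧ ¬ ∃ k < n+1, Good beers k x) := by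
          intro x
          constructor
          · intro hx
            obtain ⟨hxv, c, hc, b, hb, rfl⟩ := (mem_procLevel_snd beers f v hnd x).1 hx
            refine ⟨good_step ((hf c).1 hc).1 hb, ?_⟩
            rintro ⟨k, hk, hgk⟩
            exact hxv ((hv _).2 (good_mono (by omega) hgk))
          · rintro ⟨hg, hnk⟩
            have hxv : x ∉ (v : List Int) := by
              intro hxv
              exact hnk ⟨n, by omega, (hv x).1 hxv⟩
            have hx1 : x ∈ (L.1 : List Int) := (hv' x).2 hg
            rw [hLvis, List.mem_append] at hx1
            rcases hx1 with h1 | h1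
            · exact absurd h1 hxv
            · exact h1
        have htgt' : ∀ k < n + 1, ¬ Good beers k target := by
          intro k hk
          rcases Nat.lt_or_ge k n with h1 | h1
          · exact htgt k h1
          · have hkn : k = n := by omega
            subst hkn
            intro hgn
            exact htf ((hf target).2 ⟨hgn, fun hex => by
              obtain ⟨k', hk', hg'⟩ := hex
              exact htgt k' hk' hg'⟩)
        have hsub' : ∀ x ∈ (L.1 : List Int), x ∈ orClosure beers := by
          intro x hx
          obtain ⟨s, hsubl, -, rfl⟩ := (hv' x).1 hx
          exact orF_mem_closure hsubl
        have hC : (L.1 : List Int).length ≤ (orClosure beers).dedup.length := pv_card_le hnd' hsub'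
        have hstep : levelBFS beers target (fuel'+1) v f (n:Int)
            = levelBFS beers target fuel' L.1 L.2 ((n:Int)+1) := by
          simp only [levelBFS]
          rw [if_neg hfe, hcont]
          rw [foldB_eq_procLevel beers f v PySem.Set.empty (by intro x hx; simp [PySem.Set.empty] at hx)]
          simp only [PySem.Set.empty, List.nil_append, Bool.false_eq_true, if_false]
          rw [hL]
        rw [hstep]
        have hlen : (L.1 : List Int).length = v.length + L.2.length := by
          rw [hLvis, List.length_append]
        by_cases hδ : (L.2 : List Int) = []
        · obtain ⟨g, hg⟩ : ∃ g, fuel' = g + 1 := ⟨fuel' - 1, by omega⟩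
          have hres : levelBFS beers target fuel' L.1 L.2 ((n:Int)+1) = -1 := by
            rw [hg, hδ]
            simp [levelBFS]
          have hstab : ∀ x, Good beers (n+1) x → ∃ k < n+1, Good beers k x := by
            intro x hx
            by_contra hcon
            have hmem : x ∈ (L.2 : List Int) := (hf' x).2 ⟨hx, hcon⟩
            rw [hδ] at hmem
            simp at hmem
          rw [hres]
          refine Or.inl ⟨rfl, ?_⟩
          intro k hk
          obtain ⟨k', hk', hg'⟩ := good_stab hstab k target hk
          exact htgt' k' hk' hg'
        · have hδlen : 1 ≤ (L.2 : List Int).length := by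
            cases hh : (L.2 : List Int) with
            | nil => exact absurd hh hδ
            | cons x xs => simp
          have hfin := ih (n+1) L.1 L.2 hnd' hv' hf' htgt' (by omega)
          have hcast : ((n + 1 : Nat) : Int) = (n : Int) + 1 := by push_cast; ring
          rw [hcast] at hfin
          exact hfin

-- ---- the DP side ------------------------------------------------------------------------

def om (o : Option Int) (w : Int) : Option Int :=
  match o with
  | none => some w
  | some c => some (min c w)

def applyCands (o : Option Int) (l : List Int) : Option Int := l.foldl om o

def cands (b : Int) (L : List (Int × Int)) (x : Int) : List Int :=
  (L.filter (fun mc => PySem.Int.bor mc.1 b == x)).map (fun mc => mc.2 + 1)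

theorem dpUpd_get? (b : Int) (acc : PySem.Dict Int Int) (mc : Int × Int) (x : Int) :
    (dpUpd b acc mc).get? x =
    if x = PySem.Int.bor mc.1 b then om (PySem.Dict.get? acc x) (mc.2 + 1) else PySem.Dict.get? acc x := by
  unfold dpUpd
  cases hg : PySem.Dict.get? acc (PySem.Int.bor mc.1 b) with
  | none =>
    rw [PySem.Dict.get?_insert]
    by_cases hx : x = PySem.Int.bor mc.1 b
    · rw [if_pos hx, if_pos hx, hx, hg]; rfl
    · rw [if_neg hx, if_neg hx]
  | some cur =>
    show (if mc.2 + 1 < cur then PySem.Dict.insert acc (PySem.Int.bor mc.1 b) (mc.2 + 1) else acc).get? x = _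
    by_cases hlt : mc.2 + 1 < cur
    · rw [if_pos hlt, PySem.Dict.get?_insert]
      by_cases hx : x = PySem.Int.bor mc.1 b
      · rw [if_pos hx, if_pos hx, hx, hg]
        simp only [om]
        congr 1
        omega
      · rw [if_neg hx, if_neg hx]
    · rw [if_neg hlt]
      by_cases hx : x = PySem.Int.bor mc.1 b
      · rw [if_pos hx, hx, hg]
        simp only [om]
        congr 1
        omega
      · rw [if_neg hx]

theorem dpUpd_nodup (b : Int) (acc : PySem.Dict Int Int) (mc : Int × Int)
    (h : acc.keys.Nodup) : (dpUpd b acc mc).keys.Nodup := by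
  unfold dpUpd
  cases hg : PySem.Dict.get? acc (PySem.Int.bor mc.1 b) with
  | none => exact PySem.Dict.nodup_keys_insert _ _ _ h
  | some cur =>
    show (if mc.2 + 1 < cur then PySem.Dict.insert acc (PySem.Int.bor mc.1 b) (mc.2 + 1) else acc).keys.Nodup
    by_cases hlt : mc.2 + 1 < cur
    · rw [if_pos hlt]; exact PySem.Dict.nodup_keys_insert _ _ _ h
    · rw [if_neg hlt]; exact h

theorem foldl_dpUpd_get? (b : Int) : ∀ (L : List (Int × Int)) (acc : PySem.Dict Int Int) (x : Int),
    (L.foldl (dpUpd b) acc).get? x = applyCands (PySem.Dict.get? acc x) (cands b L x) := by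
  intro L
  induction L with
  | nil => intro acc x; simp [applyCands, cands]
  | cons mc L' ih =>
    intro acc x
    simp only [List.foldl_cons]
    rw [ih (dpUpd b acc mc), dpUpd_get?]
    by_cases hx : x = PySem.Int.bor mc.1 b
    · have hbeq : (PySem.Int.bor mc.1 b == x) = true := by simp [hx]
      rw [if_pos hx]
      simp only [cands, List.filter_cons, hbeq, if_true, List.map_cons]
      rfl
    · have hbeq : (PySem.Int.bor mc.1 b == x) = false := by
        simp only [beq_eq_false_iff_ne, ne_eq]
        intro hc; exact hx hc.symm
      rw [if_neg hx]
      simp only [cands, List.filter_cons, hbeq, Bool.false_eq_true, if_false]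

theorem foldl_dpUpd_nodup (b : Int) : ∀ (L : List (Int × Int)) (acc : PySem.Dict Int Int),
    acc.keys.Nodup → (L.foldl (dpUpd b) acc).keys.Nodup := by
  intro L
  induction L with
  | nil => intro acc h; exact h
  | cons mc L' ih =>
    intro acc h
    simp only [List.foldl_cons]
    exact ih _ (dpUpd_nodup b acc mc h)

theorem applyCands_mem {o : Option Int} {l : List Int} {c : Int}
    (h : applyCands o l = some c) : o = some c ∨ c ∈ l := by
  induction l generalizing o with
  | nil => exact Or.inl h
  | cons w l' ih =>
    rcases ih (o := om o w) h with h1 | h1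
    · cases o with
      | none =>
        simp only [om] at h1
        exact Or.inr (by rw [← Option.some_inj.1 h1]; exact List.mem_cons_self ..)
      | some c0 =>
        simp only [om] at h1
        have hmin := Option.some_inj.1 h1
        rcases le_total c0 w with hle | hle
        · exact Or.inl (by rw [← hmin, min_eq_left hle])
        · exact Or.inr (by rw [← hmin, min_eq_right hle]; exact List.mem_cons_self ..)
    · exact Or.inr (List.mem_cons_of_mem _ h1)

theorem applyCands_min {o : Option Int} {l : List Int} {c : Int}
    (h : applyCands o l = some c) :
    (∀ c₀, o = some c₀ → c ≤ c₀) ∧ (∀ w ∈ l, c ≤ w) := by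
  induction l generalizing o with
  | nil =>
    refine ⟨?_, by simp⟩
    intro c₀ hc₀
    rw [hc₀] at h
    rw [Option.some_inj.1 h]
  | cons w l' ih =>
    obtain ⟨hseed, hmem⟩ := ih (o := om o w) h
    constructor
    · intro c₀ hc₀
      subst hc₀
      have h2 := hseed (min c₀ w) (by simp [om])
      calc c ≤ min c₀ w := h2
        _ ≤ c₀ := min_le_left _ _
    · intro v hv
      rcases List.mem_cons.1 hv with rfl | hv'
      · cases o with
        | none => exact hseed v (by simp [om])
        | some c0 =>
          have h2 := hseed (min c0 v) (by simp [om])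
          calc c ≤ min c0 v := h2
            _ ≤ v := min_le_right _ _
      · exact hmem v hv' 

theorem applyCands_total_seed {l : List Int} {c₀ : Int} :
    ∀ {o : Option Int}, o = some c₀ → ∃ c, applyCands o l = some c ∧ c ≤ c₀ := by
  intro o ho
  subst ho
  induction l generalizing c₀ with
  | nil => exact ⟨c₀, rfl, le_refl _⟩
  | cons w l' ih =>
    show ∃ c, applyCands (om (some c₀) w) l' = some c ∧ c ≤ c₀
    simp only [om]
    obtain ⟨c, hc, hle⟩ := ih (c₀ := min c₀ w)
    exact ⟨c, hc, le_trans hle (min_le_left _ _)⟩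

theorem applyCands_total_mem {o : Option Int} {l : List Int} {w : Int} (hw : w ∈ l) :
    ∃ c, applyCands o l = some c ∧ c ≤ w := by
  induction l generalizing o with
  | nil => simp at hw
  | cons u l' ih =>
    rcases List.mem_cons.1 hw with rfl | hw'
    · cases o with
      | none =>
        obtain ⟨c, hc, hle⟩ := applyCands_total_seed (l := l') (c₀ := w) (o := some w) rfl
        exact ⟨c, by simpa [applyCands, om] using hc, hle⟩
      | some c0 =>
        obtain ⟨c, hc, hle⟩ := applyCands_total_seed (l := l') (c₀ := min c0 w) (o := some (min c0 w)) rfl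
        exact ⟨c, by simpa [applyCands, om] using hc, le_trans hle (min_le_right _ _)⟩
    · obtain ⟨c, hc, hle⟩ := ih (o := om o u) hw'
      exact ⟨c, hc, hle⟩

def DPInv (p : List Int) (d : PySem.Dict Int Int) : Prop :=
  d.keys.Nodup ∧
  (∀ x c, d.get? x = some c →
    ∃ s, s.Sublist p ∧ orF s = x ∧ c = (s.length : Int) ∧
      ∀ t, t.Sublist p → orF t = x → s.length ≤ t.length) ∧
  (∀ s, s.Sublist p → ∃ c, d.get? (orF s) = some c ∧ c ≤ (s.length : Int))

theorem sublist_concat_iff {t p : List Int} {b : Int} :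
    t.Sublist (p ++ [b]) ↔ t.Sublist p ∨ ∃ t₀, t₀.Sublist p ∧ t = t₀ ++ [b] := by
  constructor
  · intro h
    obtain ⟨l₁, l₂, rfl, h1, h2⟩ := List.sublist_append_iff.1 h
    rcases List.sublist_singleton.1 h2 with rfl | rfl
    · exact Or.inl (by simpa using h1)
    · exact Or.inr ⟨l₁, h1, rfl⟩
  · rintro (h | ⟨t₀, ht₀, rfl⟩)
    · exact h.trans (List.sublist_append_left p [b])
    · exact List.Sublist.append ht₀ (List.Sublist.refl [b])

theorem dpInv_step {p : List Int} {d : PySem.Dict Int Int} {b : Int}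
    (h : DPInv p d) : DPInv (p ++ [b]) (dpStep d b) := by
  obtain ⟨hnd, hreal, htot⟩ := h
  have hkeys' : (dpStep d b).keys.Nodup := foldl_dpUpd_nodup b _ d hnd
  have hget : ∀ x, (dpStep d b).get? x = applyCands (d.get? x) (cands b d.items x) :=
    fun x => foldl_dpUpd_get? b d.items d x
  have hcand : ∀ x w, w ∈ cands b d.items x ↔
      ∃ m c', d.get? m = some c' ∧ PySem.Int.bor m b = x ∧ w = c' + 1 := by
    intro x w
    simp only [cands, List.mem_map, List.mem_filter]
    constructor
    · rintro ⟨⟨m, c'⟩, ⟨hmem, hbeq⟩, rfl⟩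
      exact ⟨m, c', (PySem.Dict.get?_eq_some_iff_mem_items d _ _ hnd).2 hmem, by simpa using hbeq, rfl⟩
    · rintro ⟨m, c', hg, hbor, rfl⟩
      exact ⟨(m, c'), ⟨(PySem.Dict.get?_eq_some_iff_mem_items d _ _ hnd).1 hg, by simpa using hbor⟩, rfl⟩
  refine ⟨hkeys', ?_, ?_⟩
  · intro x c hc
    rw [hget] at hc
    have hmin := applyCands_min hc
    rcases applyCands_mem hc with hseed | hcnd
    · obtain ⟨s, hsub, horf, hclen, hminl⟩ := hreal x c hseed
      refine ⟨s, hsub.trans (List.sublist_append_left p [b]), horf, hclen, ?_⟩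
      intro t ht htf
      rcases sublist_concat_iff.1 ht with h1 | ⟨t₀, ht₀, rfl⟩
      · exact hminl t h1 htf
      · obtain ⟨c₂, hg₂, hle₂⟩ := htot t₀ ht₀
        have hwc : (c₂ + 1) ∈ cands b d.items x :=
          (hcand x _).2 ⟨orF t₀, c₂, hg₂, by rw [← orF_concat]; exact htf, rfl⟩
        have hcle := hmin.2 _ hwc
        have hlen3 : (t₀ ++ [b]).length = t₀.length + 1 := by simp
        rw [hlen3]
        omega
    · obtain ⟨m, c', hg', hbor, rfl⟩ := (hcand x _).1 hcnd
      obtain ⟨s₀, hsub₀, horf₀, hclen₀, hminl₀⟩ := hreal m c' hg'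
      refine ⟨s₀ ++ [b], List.Sublist.append hsub₀ (List.Sublist.refl [b]),
        by rw [orF_concat, horf₀, hbor], by simp; omega, ?_⟩
      intro t ht htf
      rcases sublist_concat_iff.1 ht with h1 | ⟨t₀, ht₀, rfl⟩
      · obtain ⟨c₂, hg₂, hle₂⟩ := htot t h1
        rw [htf] at hg₂
        have h3 := hmin.1 c₂ hg₂
        have hlen4 : (s₀ ++ [b]).length = s₀.length + 1 := by simp
        rw [hlen4]
        omega
      · obtain ⟨c₃, hg₃, hle₃⟩ := htot t₀ ht₀
        have hwc : (c₃ + 1) ∈ cands b d.items x :=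
          (hcand x _).2 ⟨orF t₀, c₃, hg₃, by rw [← orF_concat]; exact htf, rfl⟩
        have h3 := hmin.2 _ hwc
        have hlen3 : (t₀ ++ [b]).length = t₀.length + 1 := by simp
        have hlen4 : (s₀ ++ [b]).length = s₀.length + 1 := by simp
        rw [hlen3, hlen4]
        omega
  · intro s hs
    rcases sublist_concat_iff.1 hs with h1 | ⟨s₀, hs₀, rfl⟩
    · obtain ⟨c, hg, hle⟩ := htot s h1
      rw [hget]
      obtain ⟨c₂, hc₂, hle₂⟩ := applyCands_total_seed (l := cands b d.items (orF s)) hg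
      exact ⟨c₂, hc₂, le_trans hle₂ hle⟩
    · obtain ⟨c, hg, hle⟩ := htot s₀ hs₀
      have hw : (c + 1) ∈ cands b d.items (orF (s₀ ++ [b])) :=
        (hcand _ _).2 ⟨orF s₀, c, hg, (orF_concat s₀ b).symm, rfl⟩
      rw [hget]
      obtain ⟨c₂, hc₂, hle₂⟩ := applyCands_total_mem hw
      refine ⟨c₂, hc₂, ?_⟩
      have hlen3 : (s₀ ++ [b]).length = s₀.length + 1 := by simp
      rw [hlen3]
      push_cast
      omega

theorem dpInv_init : DPInv [] (PySem.Dict.insert PySem.Dict.empty 0 0) := by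
  refine ⟨?_, ?_, ?_⟩
  · decide
  · intro x c h
    rw [PySem.Dict.get?_insert] at h
    by_cases hx : x = 0
    · rw [if_pos hx] at h
      refine ⟨[], List.nil_sublist _, by rw [hx]; rfl, by simpa using (Option.some_inj.1 h).symm, ?_⟩
      intro t _ _
      exact Nat.zero_le _
    · rw [if_neg hx] at h
      simp [PySem.Dict.get?_empty] at h
  · intro s hs
    have hse : s = [] := List.sublist_nil.1 hs
    subst hse
    refine ⟨0, ?_, by simp⟩
    rw [show orF [] = 0 from rfl, PySem.Dict.get?_insert, if_pos rfl]

theorem dpInv_foldl : ∀ (l p : List Int) (d : PySem.Dict Int Int),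
    DPInv p d → DPInv (p ++ l) (l.foldl dpStep d) := by
  intro l
  induction l with
  | nil => intro p d h; simpa using h
  | cons b l' ih =>
    intro p d h
    simp only [List.foldl_cons]
    have h2 := ih (p ++ [b]) (dpStep d b) (dpInv_step h)
    rwa [← List.append_cons] at h2

theorem dp_answerSpec (beers : List Int) (target : Int) :
    AnswerSpec beers target
      (PySem.Dict.getD (beers.foldl dpStep (PySem.Dict.insert PySem.Dict.empty 0 0)) target (-1)) := by
  have hinv : DPInv beers (beers.foldl dpStep (PySem.Dict.insert PySem.Dict.empty 0 0)) := by
    have h2 := dpInv_foldl beers [] _ dpInv_init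
    simpa using h2
  obtain ⟨hnd, hreal, htot⟩ := hinv
  rw [PySem.Dict.getD_eq_get?_getD]
  cases hg : (beers.foldl dpStep (PySem.Dict.insert PySem.Dict.empty 0 0)).get? target with
  | none =>
    refine Or.inl ⟨rfl, ?_⟩
    rintro k ⟨s, hsub, hlen, horf⟩
    obtain ⟨c, hgg, -⟩ := htot s hsub
    rw [horf, hg] at hgg
    cases hgg
  | some c =>
    obtain ⟨s, hsub, horf, hclen, hmin⟩ := hreal target c hg
    refine Or.inr ⟨s.length, by simp [hclen], ⟨s, hsub, le_refl _, horf⟩, ?_⟩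
    rintro k hk ⟨t, htsub, htlen, htorf⟩
    have h3 := hmin t htsub htorf
    omega

-- ===== VERDICT (by name: the statement is the Claim_ definition above) =====
theorem solve_spec : Claim_equal_solve := by
  intro beers workers_num _ _
  unfold Spec_solve
  have h2 : (orClosure beers).dedup.length ≤ 2 ^ beers.length := by
    rw [← orClosure_length beers]; exact (List.dedup_sublist _).length_le
  have hA : AnswerSpec beers ((1 <<< workers_num.toNat) - 1) (solve beers workers_num) := by
    have hsim : solve beers workers_num
        = levelBFS beers ((1 <<< workers_num.toNat) - 1) (2 ^ beers.length + 2)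
            (PySem.Set.ofList [0]) (PySem.Set.ofList [0]) 0 := by
      unfold solve
      have h0 : ([(0, 0)] : List (Int × Int))
          = ((((PySem.Set.ofList [0] : PySem.Set Int) : List Int).map (fun x => (x, (0:Int)))).reverse) := rfl
      rw [h0]
      apply simulation
      · simp [PySem.Set.ofList, PySem.Set.add, PySem.Set.contains, PySem.Set.empty]
      · intro x hx
        simp [PySem.Set.ofList, PySem.Set.add, PySem.Set.contains, PySem.Set.empty] at hx
        subst hx; exact zero_mem_orClosure beers
      · intro x hx; exact hx
      · have h1 : (PySem.Set.ofList [(0:Int)] : List Int) = [0] := rfl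
        rw [h1]; simp only [List.length_cons, List.length_nil]; omega
      · have h1 : (PySem.Set.ofList [(0:Int)] : List Int) = [0] := rfl
        rw [h1]; simp only [List.length_cons, List.length_nil]; omega
    rw [hsim]
    have he : (PySem.Set.ofList [(0:Int)] : List Int) = [0] := rfl
    have hnd0 : ((PySem.Set.ofList [(0:Int)]) : List Int).Nodup := by
      rw [he]; simp
    have hv0 : ∀ x, x ∈ ((PySem.Set.ofList [(0:Int)]) : List Int) ↔ Good beers 0 x := by
      intro x; rw [he, good_zero_iff]; simp
    have hf0 : ∀ x, x ∈ ((PySem.Set.ofList [(0:Int)]) : List Int) ↔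
        (Good beers 0 x ∧ ¬ ∃ k < 0, Good beers k x) := by
      intro x; rw [he, good_zero_iff]; simp
    have htgt0 : ∀ k < 0, ¬ Good beers k ((1 <<< workers_num.toNat) - 1) := by
      intro k hk; omega
    have hfuel0 : 2 ^ beers.length + 2 ≥
        ((orClosure beers).dedup.length - (PySem.Set.ofList [(0:Int)] : List Int).length) + 2 := by
      rw [he]; simp only [List.length_cons, List.length_nil]; omega
    have hcor := levelBFS_correct beers ((1 <<< workers_num.toNat) - 1) (2 ^ beers.length + 2) 0
      (PySem.Set.ofList [0]) (PySem.Set.ofList [0]) hnd0 hv0 hf0 htgt0 hfuel0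
    simpa using hcor
  have hB : AnswerSpec beers ((1 <<< workers_num.toNat) - 1) (solve_alt beers workers_num) := by
    unfold solve_alt
    exact dp_answerSpec beers _
  exact answerSpec_unique hA hB
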